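-- pv_equiv track=rewrite | github.com/Rick-Wilson/Baker-Bridge | Tools/fill_hands.py | convert_hand_to_pbn
-- ===== SOURCE A (Python) =====
-- def convert_hand_to_pbn(hand: str) -> str:
--     """
--     Convert hand from CSV format (S:xx H:xx D:xx C:xx) to PBN format (xxxx.xxxx.xxxx.xxxx).
--     """
--     # Parse S:xx H:xx D:xx C:xx format
--     parts = hand.split()
--     suits = {}
--     for part in parts:
--         if ':' in part:
--             suit, cards = part.split(':', 1)
--             suits[suit.upper()] = cards if cards else ''
--
--     # Return in SHDC order with dots
--     return f"{suits.get('S', '')}.{suits.get('H', '')}.{suits.get('D', '')}.{suits.get('C', '')}"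
-- ===== SOURCE B (Python) =====
-- def convert_hand_to_pbn(hand: str) -> str:
--     """
--     Convert hand from CSV format (S:xx H:xx D:xx C:xx) to PBN format (xxxx.xxxx.xxxx.xxxx).
--     """
--     tokens = hand.split()
--     fields = []
--     for letter in ('S', 'H', 'D', 'C'):
--         cards = ''
--         for tok in tokens:
--             if ':' in tok:
--                 suit, rest = tok.split(':', 1)
--                 if suit.upper() == letter:
--                     cards = rest
--         fields.append(cards)
--     return '.'.join(fields)
-- ===== Notes on version B (the rewrite author's own statement) =====
-- stated objective: alternative
-- what changed: Replaced the build-a-dict-then-lookup strategy with four direct per-suit scans over the whitespace-split tokens (last matching token wins), the four card strings then dot-joined.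
import Mathlib
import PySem

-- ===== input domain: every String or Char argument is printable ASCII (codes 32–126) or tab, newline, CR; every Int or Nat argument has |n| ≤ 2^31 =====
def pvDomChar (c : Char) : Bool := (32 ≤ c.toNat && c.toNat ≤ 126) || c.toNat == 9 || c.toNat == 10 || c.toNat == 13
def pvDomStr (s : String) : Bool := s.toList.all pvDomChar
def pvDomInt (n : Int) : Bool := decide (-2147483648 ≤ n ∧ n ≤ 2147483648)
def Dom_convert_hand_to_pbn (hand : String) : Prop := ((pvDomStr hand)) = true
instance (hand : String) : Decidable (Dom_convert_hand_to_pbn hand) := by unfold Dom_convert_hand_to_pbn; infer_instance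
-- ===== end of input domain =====

-- B replaces A's dict-building pass with one direct scan of the tokens per suit letter (alternative decomposition, same cost).

-- ===== PORT A =====
-- dict update step of A's loop (split(':', 1) always yields two pieces here since ':' ∈ part)
def pvStepA (d : PySem.Dict String String) (part : String) : PySem.Dict String String :=
  if PySem.Str.isIn ":" part then
    let l := (PySem.Str.splitMax? part ":" 1).getD []
    let suit := l.getD 0 ""
    let cards := l.getD 1 ""
    d.insert (PySem.Str.upper suit) (if cards ≠ "" then cards else "")
  else d

def convert_hand_to_pbn (hand : String) : String :=
  let parts := PySem.Str.split₀ hand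
  let suits := parts.foldl pvStepA PySem.Dict.empty
  PySem.Str.join "." [suits.getD "S" "", suits.getD "H" "", suits.getD "D" "", suits.getD "C" ""]

-- ===== PORT B =====
-- inner loop of B: scan all tokens, keep the cards of the LAST token whose upper-cased prefix is `letter`
def pvCardsFor (tokens : List String) (letter : String) : String :=
  tokens.foldl (fun acc tok =>
    if PySem.Str.isIn ":" tok then
      let l := (PySem.Str.splitMax? tok ":" 1).getD []
      if PySem.Str.upper (l.getD 0 "") = letter then l.getD 1 "" else acc
    else acc) ""

def convert_hand_to_pbn_alt (hand : String) : String :=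
  let tokens := PySem.Str.split₀ hand
  PySem.Str.join "." ((["S", "H", "D", "C"] : List String).map (pvCardsFor tokens))

-- ===== PRECONDITION & SPEC =====
def Spec_convert_hand_to_pbn (hand : String) (out : String) : Prop := out = convert_hand_to_pbn_alt hand
instance (hand : String) (out : String) : Decidable (Spec_convert_hand_to_pbn hand out) := by unfold Spec_convert_hand_to_pbn; infer_instance

-- ===== CLAIM (what is proved, stated in full; the proofs are below) =====
def Claim_equal_convert_hand_to_pbn : Prop := ∀ (hand : String), Dom_convert_hand_to_pbn hand → Spec_convert_hand_to_pbn hand (convert_hand_to_pbn hand)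

-- ===== LEMMAS AND PROOFS =====

-- A's dict lookup at key k after the whole loop equals B's per-suit scan, from any start
lemma pvFold_getD (tokens : List String) (d : PySem.Dict String String) (k : String) :
    (tokens.foldl pvStepA d).getD k "" =
    tokens.foldl (fun acc tok =>
      if PySem.Str.isIn ":" tok then
        let l := (PySem.Str.splitMax? tok ":" 1).getD []
        if PySem.Str.upper (l.getD 0 "") = k then l.getD 1 "" else acc
      else acc) (d.getD k "") := by
  induction tokens generalizing d with
  | nil => rfl
  | cons t ts ih =>
    simp only [List.foldl_cons]
    rw [ih]
    congr 1
    unfold pvStepA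
    by_cases h : PySem.Str.isIn ":" t = true
    · simp only [h, if_pos]
      rw [PySem.Dict.getD_insert]
      by_cases hk : k = PySem.Str.upper (((PySem.Str.splitMax? t ":" 1).getD []).getD 0 "")
      · simp [hk]
      · rw [if_neg hk, if_neg (fun h' => hk h'.symm)]
    · rw [PySem.Str.isIn_eq] at h
      simp only [show ":".toList = [':'] from rfl] at h
      simp [h]

lemma pvCardsFor_eq (hand : String) (k : String) :
    ((PySem.Str.split₀ hand).foldl pvStepA PySem.Dict.empty).getD k "" =
    pvCardsFor (PySem.Str.split₀ hand) k := by
  rw [pvFold_getD]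
  rfl

-- ===== VERDICT (by name: the statement is the Claim_ definition above) =====
theorem convert_hand_to_pbn_spec : Claim_equal_convert_hand_to_pbn := by
  intro hand _
  unfold Spec_convert_hand_to_pbn convert_hand_to_pbn convert_hand_to_pbn_alt
  simp only [List.map]
  rw [pvCardsFor_eq, pvCardsFor_eq, pvCardsFor_eq, pvCardsFor_eq]
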